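-- pv_equiv track=rewrite | github.com/pnnl/oedisi_dopf | lindistflow_federate/adapter.py | find_consecutive_phase
-- ===== SOURCE A (Python) =====
-- def find_consecutive_phase(connected: list[list[bool]]) -> int:
--     connected_row = []
--     connected_col = []
--     for i in range(3):
--         consecutive = 0
--         for j in range(3):
--             if connected[i][j]:
--                 consecutive += 1
--             else:
--                 consecutive = 0
--
--             if consecutive >= 2:
--                 connected_row.append(i)
--
--     for j in range(3):
--         consecutive = 0
--         for i in range(3):
--             if connected[i][j]:
--                 consecutive += 1
--             else:
--                 consecutive = 0
--
--             if consecutive >= 2: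
--                 connected_col.append(j)
--
--     if connected_col and connected_row:
--         raise Exception("hase phase in both row and col of xfmr")
--
--     if connected_row:
--         return connected_row[0]
--
--     if connected_col:
--         return connected_col[0]
-- ===== SOURCE B (Python) =====
-- def find_consecutive_phase(connected: list[list[bool]]) -> int:
--     # Pack the 3x3 matrix into a 9-bit integer and find adjacent pairs by
--     # shift-and-AND bit arithmetic instead of scanning with counters.
--     m = 0
--     for i in range(3):
--         for j in range(3):
--             if connected[i][j]:
--                 m |= 1 << (3 * i + j)
--
--     horiz = m & (m >> 1) & 0o333   # bit 3i+j set iff cells (i,j),(i,j+1) both set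
--     vert = m & (m >> 3)            # bit 3i+j set iff cells (i,j),(i+1,j) both set
--     rows = (horiz | (horiz >> 1)) & 0o111   # bit 3i set iff row i has a pair
--     cols = (vert | (vert >> 3)) & 0o7       # bit j set iff column j has a pair
--
--     if rows and cols:
--         raise Exception("hase phase in both row and col of xfmr")
--     if rows:
--         return ((rows & -rows).bit_length() - 1) // 3
--     if cols:
--         return (cols & -cols).bit_length() - 1
-- ===== Notes on version B (the rewrite author's own statement) =====
-- stated objective: alternative
-- what changed: Replaces the running-consecutive-counter scans that append hit indices into two lists with bit arithmetic: the 3x3 matrix is packed into one 9-bit integer, adjacent pairs are detected by shift-and-AND masks, and the answer is the lowest set bit of the row/column pair mask.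
-- outside the precondition, e.g. on find_consecutive_phase([[True, True]]): A raises IndexError, B raises IndexError
import Mathlib
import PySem

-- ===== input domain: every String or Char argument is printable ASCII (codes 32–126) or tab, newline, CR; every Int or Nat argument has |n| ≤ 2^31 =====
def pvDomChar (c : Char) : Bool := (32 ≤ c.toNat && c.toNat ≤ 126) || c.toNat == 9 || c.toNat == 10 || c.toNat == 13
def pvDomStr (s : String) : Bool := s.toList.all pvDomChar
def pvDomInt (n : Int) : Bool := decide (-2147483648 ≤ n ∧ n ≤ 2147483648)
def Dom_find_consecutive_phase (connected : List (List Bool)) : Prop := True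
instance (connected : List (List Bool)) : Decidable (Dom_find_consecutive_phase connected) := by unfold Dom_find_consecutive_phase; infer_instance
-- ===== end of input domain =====

-- B packs the 3x3 matrix into a 9-bit integer and finds adjacent pairs by shift-and-AND bit
-- arithmetic instead of A's running-counter scans (objective: alternative).

-- connected[i][j]; exact for in-range indices, which Pre_ guarantees (out of range Python raises IndexError, excluded by Pre_)
def pvCell (connected : List (List Bool)) (i j : Nat) : Bool :=
  (connected.getD i []).getD j false

-- ===== PORT A =====
def find_consecutive_phase (connected : List (List Bool)) : Int :=
  let connected_row : List Int := (List.range 3).foldl (fun acc i =>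
    ((List.range 3).foldl (fun (st : Nat × List Int) j =>
        let consecutive := if pvCell connected i j then st.1 + 1 else 0
        (consecutive, if consecutive ≥ 2 then st.2 ++ [(i : Int)] else st.2))
      (0, acc)).2) []
  let connected_col : List Int := (List.range 3).foldl (fun acc j =>
    ((List.range 3).foldl (fun (st : Nat × List Int) i =>
        let consecutive := if pvCell connected i j then st.1 + 1 else 0
        (consecutive, if consecutive ≥ 2 then st.2 ++ [(j : Int)] else st.2))
      (0, acc)).2) []
  if connected_col ≠ [] ∧ connected_row ≠ [] then 0  -- Python raises here (excluded by Pre_)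
  else match connected_row with
  | r :: _ => r
  | [] => match connected_col with
    | c :: _ => c
    | [] => 0  -- Python returns None here (excluded by Pre_)

-- ===== PORT B =====
-- Python's (x & -x).bit_length() - 1 for a nonnegative int: the index of the lowest set bit; exact for x > 0
def pvLowBitIdx (x : Nat) : Nat := (Nat.land x (Nat.xor x (x - 1))).size - 1

def find_consecutive_phase_alt (connected : List (List Bool)) : Int :=
  let m : Nat := (List.range 3).foldl (fun m i =>
    (List.range 3).foldl (fun m j =>
      if pvCell connected i j then Nat.lor m (1 <<< (3 * i + j)) else m) m) 0
  let horiz := Nat.land (Nat.land m (m >>> 1)) 219   -- 0o333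
  let vert := Nat.land m (m >>> 3)
  let rows := Nat.land (Nat.lor horiz (horiz >>> 1)) 73   -- 0o111
  let cols := Nat.land (Nat.lor vert (vert >>> 3)) 7      -- 0o7
  if rows ≠ 0 ∧ cols ≠ 0 then 0  -- Python raises here (excluded by Pre_)
  else if rows ≠ 0 then ((pvLowBitIdx rows) / 3 : Nat)
  else if cols ≠ 0 then (pvLowBitIdx cols : Nat)
  else 0  -- Python returns None here (excluded by Pre_)

-- ===== PRECONDITION & SPEC =====
def pvPair (a b c : Bool) : Bool := (a && b) || (b && c)

-- Pre_ excludes inputs where the Python A does not return an int: matrices without a full 3x3 of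
-- entries (IndexError), matrices with a consecutive pair in both a row and a column (A raises
-- Exception), and matrices with no consecutive pair at all (A falls through and returns None).
def Pre_find_consecutive_phase (connected : List (List Bool)) : Prop :=
  3 ≤ connected.length ∧ (∀ r ∈ connected.take 3, 3 ≤ r.length) ∧
  ((∃ i ∈ List.range 3, pvPair (pvCell connected i 0) (pvCell connected i 1) (pvCell connected i 2)) ↔
   ¬ (∃ j ∈ List.range 3, pvPair (pvCell connected 0 j) (pvCell connected 1 j) (pvCell connected 2 j)))
instance (connected : List (List Bool)) : Decidable (Pre_find_consecutive_phase connected) := by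
  unfold Pre_find_consecutive_phase; infer_instance

def pvWitness_find_consecutive_phase : List (List Bool) :=
  [[true, true, false], [false, false, false], [false, false, false]]

def Spec_find_consecutive_phase (connected : List (List Bool)) (out : Int) : Prop := out = find_consecutive_phase_alt connected
instance (connected : List (List Bool)) (out : Int) : Decidable (Spec_find_consecutive_phase connected out) := by unfold Spec_find_consecutive_phase; infer_instance

-- ===== CLAIM (what is proved, stated in full; the proofs are below) =====
def Claim_equal_find_consecutive_phase : Prop := ∀ (connected : List (List Bool)), Dom_find_consecutive_phase connected → Pre_find_consecutive_phase connected → Spec_find_consecutive_phase connected (find_consecutive_phase connected)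

-- ===== LEMMAS AND PROOFS =====

-- Both ports are functions of the nine cells only: abstract the bodies over the nine cells.
def pvCore_A (x00 x01 x02 x10 x11 x12 x20 x21 x22 : Bool) : Int :=
  let cell : Nat → Nat → Bool := fun i j =>
    [[x00,x01,x02],[x10,x11,x12],[x20,x21,x22]].getD i [] |>.getD j false
  let connected_row : List Int := (List.range 3).foldl (fun acc i =>
    ((List.range 3).foldl (fun (st : Nat × List Int) j =>
        let consecutive := if cell i j then st.1 + 1 else 0
        (consecutive, if consecutive ≥ 2 then st.2 ++ [(i : Int)] else st.2))
      (0, acc)).2) []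
  let connected_col : List Int := (List.range 3).foldl (fun acc j =>
    ((List.range 3).foldl (fun (st : Nat × List Int) i =>
        let consecutive := if cell i j then st.1 + 1 else 0
        (consecutive, if consecutive ≥ 2 then st.2 ++ [(j : Int)] else st.2))
      (0, acc)).2) []
  if connected_col ≠ [] ∧ connected_row ≠ [] then 0
  else match connected_row with
  | r :: _ => r
  | [] => match connected_col with
    | c :: _ => c
    | [] => 0

def pvCore_B (x00 x01 x02 x10 x11 x12 x20 x21 x22 : Bool) : Int :=
  let cell : Nat → Nat → Bool := fun i j =>
    [[x00,x01,x02],[x10,x11,x12],[x20,x21,x22]].getD i [] |>.getD j false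
  let m : Nat := (List.range 3).foldl (fun m i =>
    (List.range 3).foldl (fun m j =>
      if cell i j then Nat.lor m (1 <<< (3 * i + j)) else m) m) 0
  let horiz := Nat.land (Nat.land m (m >>> 1)) 219
  let vert := Nat.land m (m >>> 3)
  let rows := Nat.land (Nat.lor horiz (horiz >>> 1)) 73
  let cols := Nat.land (Nat.lor vert (vert >>> 3)) 7
  if rows ≠ 0 ∧ cols ≠ 0 then 0
  else if rows ≠ 0 then ((pvLowBitIdx rows) / 3 : Nat)
  else if cols ≠ 0 then (pvLowBitIdx cols : Nat)
  else 0

theorem pvCore_A_spec (c : List (List Bool)) :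
    find_consecutive_phase c = pvCore_A (pvCell c 0 0) (pvCell c 0 1) (pvCell c 0 2)
      (pvCell c 1 0) (pvCell c 1 1) (pvCell c 1 2)
      (pvCell c 2 0) (pvCell c 2 1) (pvCell c 2 2) := rfl

theorem pvCore_B_spec (c : List (List Bool)) :
    find_consecutive_phase_alt c = pvCore_B (pvCell c 0 0) (pvCell c 0 1) (pvCell c 0 2)
      (pvCell c 1 0) (pvCell c 1 1) (pvCell c 1 2)
      (pvCell c 2 0) (pvCell c 2 1) (pvCell c 2 2) := rfl

theorem pvCore_eq : ∀ x00 x01 x02 x10 x11 x12 x20 x21 x22 : Bool,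
    pvCore_A x00 x01 x02 x10 x11 x12 x20 x21 x22 =
    pvCore_B x00 x01 x02 x10 x11 x12 x20 x21 x22 := by decide

theorem find_eq_of_cells (c : List (List Bool)) :
    find_consecutive_phase c = find_consecutive_phase_alt c := by
  rw [pvCore_A_spec, pvCore_B_spec, pvCore_eq]

-- ===== VERDICT (by name: the statement is the Claim_ definition above) =====
theorem find_consecutive_phase_spec : Claim_equal_find_consecutive_phase := by
  intro connected _ _
  exact find_eq_of_cells connected
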